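-- pv_equiv track=rewrite | github.com/rightway-p/proj.podcast_server.python | automation-service/automation_service/schemas.py | _normalize_days
-- ===== SOURCE A (Python) =====
-- def _normalize_days(values: list[str]) -> list[str]:
--     if not values:
--         msg = "at least one day must be selected"
--         raise ValueError(msg)
--     normalized: list[str] = []
--     allowed = {
--         "mon": "mon",
--         "monday": "mon",
--         "tue": "tue",
--         "tuesday": "tue",
--         "wed": "wed",
--         "wednesday": "wed",
--         "thu": "thu",
--         "thursday": "thu",
--         "fri": "fri",
--         "friday": "fri",
--         "sat": "sat",
--         "saturday": "sat",
--         "sun": "sun",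
--         "sunday": "sun",
--     }
--     for raw in values:
--         key = (raw or "").strip().lower()
--         value = allowed.get(key)
--         if value is None:
--             short = key[:3]
--             value = allowed.get(short)
--         if value is None:
--             msg = f"invalid day value '{raw}'"
--             raise ValueError(msg)
--         if value not in normalized:
--             normalized.append(value)
--     return normalized
-- ===== SOURCE B (Python) =====
-- _DAYS = ("mon", "tue", "wed", "thu", "fri", "sat", "sun")
--
--
-- def _normalize_days(values: list[str]) -> list[str]:
--     if not values:
--         raise ValueError("at least one day must be selected")
--     return _dedup_codes(values)
--
--
-- def _dedup_codes(values: list[str]) -> list[str]: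
--     # Recursive back-to-front dedup: keep the head's code, strip it from the
--     # recursively deduped tail.  First-occurrence order falls out naturally.
--     if not values:
--         return []
--     raw = values[0]
--     code = (raw or "").strip().lower()[:3]
--     if code not in _DAYS:
--         raise ValueError(f"invalid day value '{raw}'")
--     rest = _dedup_codes(values[1:])
--     return [code] + [c for c in rest if c != code]
-- ===== Notes on version B (the rewrite author's own statement) =====
-- stated objective: alternative
-- what changed: Replaces A's 14-key alias dict with two-tier lookup and an incremental 'not in normalized' accumulator by a recursion that normalizes the head to its 3-letter prefix and builds the result back-to-front, deduplicating by filtering the head's code out of the recursively deduped tail; no dict and no membership test against the output list.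
import Mathlib
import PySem

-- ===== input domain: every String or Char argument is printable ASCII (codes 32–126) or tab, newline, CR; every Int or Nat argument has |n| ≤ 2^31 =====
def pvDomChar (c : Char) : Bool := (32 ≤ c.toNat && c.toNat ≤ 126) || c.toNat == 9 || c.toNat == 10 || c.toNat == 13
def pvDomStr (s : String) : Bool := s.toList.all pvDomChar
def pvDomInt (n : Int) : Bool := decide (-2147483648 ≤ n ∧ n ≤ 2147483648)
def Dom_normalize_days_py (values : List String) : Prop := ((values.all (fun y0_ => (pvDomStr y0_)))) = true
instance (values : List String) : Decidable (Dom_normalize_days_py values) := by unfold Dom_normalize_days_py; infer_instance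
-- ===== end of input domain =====

-- B drops A's alias dict and output-membership dedup for a back-to-front recursion
-- (head code :: tail result with the head's code filtered out); return value only, no mutation.

-- ===== PORT A =====
-- the literal 14-key alias dict of A
def pvAllowed : PySem.Dict String String :=
  PySem.Dict.ofList
    [("mon", "mon"), ("monday", "mon"), ("tue", "tue"), ("tuesday", "tue"),
     ("wed", "wed"), ("wednesday", "wed"), ("thu", "thu"), ("thursday", "thu"),
     ("fri", "fri"), ("friday", "fri"), ("sat", "sat"), ("saturday", "sat"),
     ("sun", "sun"), ("sunday", "sun")]

-- one iteration of A's loop: none = the ValueError branch was reached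
def pvStepA (acc : Option (List String)) (raw : String) : Option (List String) :=
  match acc with
  | none => none
  | some normalized =>
    let key := PySem.Str.lower (PySem.Str.strip (if raw == "" then "" else raw))
    let value :=
      match pvAllowed.get? key with
      | some v => some v
      | none => pvAllowed.get? (PySem.Str.slice key none (some 3))
    match value with
    | none => none
    | some v => some (if v ∈ normalized then normalized else normalized ++ [v])

def normalize_days_py (values : List String) : List String :=
  if values = [] then []          -- A raises ValueError here; excluded by Pre_
  else (values.foldl pvStepA (some [])).getD []

-- ===== PORT B =====
def pvDaysB : List String := ["mon", "tue", "wed", "thu", "fri", "sat", "sun"]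

-- Source B's _dedup_codes: none = the ValueError branch was reached
def pvDedupCodes : List String → Option (List String)
  | [] => some []
  | raw :: rest =>
    let code := PySem.Str.slice (PySem.Str.lower (PySem.Str.strip (if raw == "" then "" else raw))) none (some 3)
    if code ∈ pvDaysB then
      match pvDedupCodes rest with
      | none => none
      | some r => some (code :: r.filter (fun c => c ≠ code))
    else none

def normalize_days_py_alt (values : List String) : List String :=
  if values = [] then []          -- B raises ValueError here; excluded by Pre_
  else (pvDedupCodes values).getD []

-- ===== PRECONDITION & SPEC =====
-- Pre_ excludes exactly the inputs on which A raises ValueError: the empty list, and any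
-- entry whose stripped lowercase 3-letter prefix is not a weekday code.
def Pre_normalize_days_py (values : List String) : Prop :=
  values ≠ [] ∧ ∀ raw ∈ values,
    PySem.Str.slice (PySem.Str.lower (PySem.Str.strip raw)) none (some 3)
      ∈ ["mon", "tue", "wed", "thu", "fri", "sat", "sun"]
instance (values : List String) : Decidable (Pre_normalize_days_py values) := by
  unfold Pre_normalize_days_py; infer_instance

def pvWitness_normalize_days_py : List String := ["Monday ", "tue", "thursday", "TUE"]

def Spec_normalize_days_py (values : List String) (out : List String) : Prop := out = normalize_days_py_alt values
instance (values : List String) (out : List String) : Decidable (Spec_normalize_days_py values out) := by unfold Spec_normalize_days_py; infer_instance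

-- ===== CLAIM (what is proved, stated in full; the proofs are below) =====
def Claim_equal_normalize_days_py : Prop := ∀ (values : List String), Dom_normalize_days_py values → Pre_normalize_days_py values → Spec_normalize_days_py values (normalize_days_py values)

-- ===== LEMMAS AND PROOFS =====

-- the normalized 3-letter code of an entry
def pvCode (raw : String) : String :=
  PySem.Str.slice (PySem.Str.lower (PySem.Str.strip raw)) none (some 3)

-- (raw or "") is raw itself: the guard only replaces "" by ""
theorem pvGuard_eq (raw : String) : (if raw == "" then "" else raw) = raw := by
  by_cases h : raw = "" <;> simp [h]

-- pvDedupCodes on a cons with a valid head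
theorem pvDedup_cons (raw : String) (rest : List String) (hv : pvCode raw ∈ pvDaysB) :
    pvDedupCodes (raw :: rest) =
      match pvDedupCodes rest with
      | none => none
      | some r => some (pvCode raw :: r.filter (fun c => c ≠ pvCode raw)) := by
  simp only [pvDedupCodes, pvGuard_eq]
  split_ifs with hcond
  · simp [pvCode]
  · exact absurd (by simpa [pvCode] using hv) hcond

-- A's two-tier lookup of a valid key resolves to the key's 3-letter prefix
theorem pvLookup_eq (key : String)
    (h : PySem.Str.slice key none (some 3) ∈ pvDaysB) :
    (match pvAllowed.get? key with
     | some v => some v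
     | none => pvAllowed.get? (PySem.Str.slice key none (some 3))) =
      some (PySem.Str.slice key none (some 3)) := by
  cases hget : pvAllowed.get? key with
  | some v =>
    have hm := PySem.Dict.mem_items_of_get?_eq_some pvAllowed hget
    have hitems : pvAllowed.items =
        [("mon", "mon"), ("monday", "mon"), ("tue", "tue"), ("tuesday", "tue"),
         ("wed", "wed"), ("wednesday", "wed"), ("thu", "thu"), ("thursday", "thu"),
         ("fri", "fri"), ("friday", "fri"), ("sat", "sat"), ("saturday", "sat"),
         ("sun", "sun"), ("sunday", "sun")] := by decide
    rw [hitems] at hm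
    simp only [List.mem_cons, List.not_mem_nil, or_false, Prod.mk.injEq] at hm
    rcases hm with ⟨h1, h2⟩ | ⟨h1, h2⟩ | ⟨h1, h2⟩ | ⟨h1, h2⟩ | ⟨h1, h2⟩ | ⟨h1, h2⟩ |
      ⟨h1, h2⟩ | ⟨h1, h2⟩ | ⟨h1, h2⟩ | ⟨h1, h2⟩ | ⟨h1, h2⟩ | ⟨h1, h2⟩ | ⟨h1, h2⟩ | ⟨h1, h2⟩ <;>
      subst h1 <;> subst h2 <;> decide
  | none =>
    simp only [pvDaysB, List.mem_cons, List.not_mem_nil, or_false] at h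
    rcases h with h | h | h | h | h | h | h <;> rw [h] <;> decide

-- one valid step of A appends the code when it is new
theorem pvStepA_eq (acc : List String) (raw : String) (hv : pvCode raw ∈ pvDaysB) :
    pvStepA (some acc) raw =
      some (if pvCode raw ∈ acc then acc else acc ++ [pvCode raw]) := by
  simp only [pvStepA, pvGuard_eq]
  rw [pvLookup_eq _ (by simpa [pvCode] using hv)]
  simp [pvCode]

-- the core correspondence: A's left fold from accumulator acc equals B's recursion,
-- with elements already in acc filtered out of B's result
theorem pvMain (values : List String)
    (h : ∀ raw ∈ values, pvCode raw ∈ pvDaysB) (acc : List String) :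
    values.foldl pvStepA (some acc) =
      (pvDedupCodes values).map (fun r => acc ++ r.filter (fun c => decide (c ∉ acc))) := by
  induction values generalizing acc with
  | nil => simp [pvDedupCodes]
  | cons raw rest ih =>
    have hv : pvCode raw ∈ pvDaysB := h raw (by simp)
    have hrest : ∀ r ∈ rest, pvCode r ∈ pvDaysB := fun r hr => h r (by simp [hr])
    simp only [List.foldl_cons, pvStepA_eq acc raw hv]
    rw [pvDedup_cons raw rest hv, ih hrest]
    cases pvDedupCodes rest with
    | none => rfl
    | some r =>
      simp only [Option.map_some]
      by_cases hc : pvCode raw ∈ acc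
      · rw [if_pos hc]
        congr 2
        rw [List.filter_cons, if_neg (by simp [hc]), List.filter_filter]
        apply List.filter_congr
        intro x _
        by_cases hx : x ∈ acc
        · simp [hx]
        · have hne : x ≠ pvCode raw := fun he => hx (he ▸ hc)
          simp [hx, hne]
      · rw [if_neg hc]
        congr 1
        rw [List.filter_cons, if_pos (by simp [hc]), List.filter_filter,
            List.append_assoc, List.singleton_append]
        congr 2
        apply List.filter_congr
        intro x _
        by_cases hx : x ∈ acc
        · simp [hx]
        · by_cases he : x = pvCode raw <;> simp [hx, he]

-- ===== VERDICT (by name: the statement is the Claim_ definition above) =====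
theorem normalize_days_py_spec : Claim_equal_normalize_days_py := by
  intro values _ hpre
  obtain ⟨hne, hall⟩ := hpre
  show normalize_days_py values = normalize_days_py_alt values
  unfold normalize_days_py normalize_days_py_alt
  rw [if_neg hne, if_neg hne]
  have hall' : ∀ raw ∈ values, pvCode raw ∈ pvDaysB := by
    simpa [pvCode, pvDaysB] using hall
  rw [pvMain values hall' []]
  cases pvDedupCodes values <;> simp
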